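-- pv_equiv track=rewrite | github.com/mdeng1110/Computing_Talent_Initiative | 6_S3_Longest_Anagram_Through_Deletion.py | longest_anagram
-- ===== SOURCE A (Python) =====
-- def longest_anagram(string, dictionary):
--   best = ""
--   for d in dictionary:
--     temp = ""
--     i = 0
--     j = 0
--     while i < len(d) and j < len(string):
--       if d[i] == string[j]:
--         temp += string[j]
--         i += 1
--         j += 1
--       else:
--         j += 1
--     if len(temp) > len(best):
--       best = temp
--   return best
-- ===== SOURCE B (Python) =====
-- from bisect import bisect_right
--
-- def longest_anagram(string, dictionary):
--     positions = {}
--     for idx, ch in enumerate(string):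
--         positions.setdefault(ch, []).append(idx)
--     best = ""
--     for d in dictionary:
--         pos = -1
--         matched = []
--         for c in d:
--             lst = positions.get(c, [])
--             k = bisect_right(lst, pos)
--             if k < len(lst):
--                 pos = lst[k]
--                 matched.append(c)
--             else:
--                 break
--         cand = "".join(matched)
--         if len(cand) > len(best):
--             best = cand
--     return best
-- ===== Notes on version B (the rewrite author's own statement) =====
-- stated objective: faster
-- what changed: B precomputes a dict mapping each character to the sorted list of its positions in the string, then matches each word by bisecting to the next occurrence after the current position (breaking on a miss), instead of A's linear rescan of the string per word.
import Mathlib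
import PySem

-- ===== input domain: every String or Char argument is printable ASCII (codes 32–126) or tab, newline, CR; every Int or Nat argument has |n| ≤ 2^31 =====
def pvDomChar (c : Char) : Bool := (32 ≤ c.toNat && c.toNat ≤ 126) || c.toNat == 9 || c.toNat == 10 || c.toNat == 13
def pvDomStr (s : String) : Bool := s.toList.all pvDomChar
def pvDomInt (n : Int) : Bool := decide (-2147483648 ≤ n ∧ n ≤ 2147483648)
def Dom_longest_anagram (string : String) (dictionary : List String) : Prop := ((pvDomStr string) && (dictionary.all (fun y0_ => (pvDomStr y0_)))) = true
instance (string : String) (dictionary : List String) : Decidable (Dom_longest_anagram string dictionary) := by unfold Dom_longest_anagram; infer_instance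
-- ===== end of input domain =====

-- B replaces A's per-word linear rescan of `string` by a precomputed per-character position index queried with bisect (objective: faster).

-- ===== PORT A =====
-- A's while loop: i indexes the word d, j scans string; on a match both advance, else only j.
def pvWhileA (d s : List Char) (temp : List Char) (i j : Nat) : List Char :=
  if h : i < d.length ∧ j < s.length then
    if d.getD i ' ' = s.getD j ' ' then
      pvWhileA d s (temp ++ [s.getD j ' ']) (i + 1) (j + 1)
    else
      pvWhileA d s temp i (j + 1)
  else temp
termination_by s.length - j
decreasing_by all_goals omega

def longest_anagram (string : String) (dictionary : List String) : String :=
  String.mk (dictionary.foldl (fun best d =>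
    let temp := pvWhileA d.toList string.toList [] 0 0
    if temp.length > best.length then temp else best) [])

-- ===== PORT B =====
-- B's per-word loop: pos is the last matched position (-1 initially); bisect_right finds the
-- first occurrence of c strictly after pos; break (return matched) when there is none.
def pvBLoop (positions : PySem.Dict Char (List Int)) (cs : List Char) (pos : Int) (matched : List Char) : List Char :=
  match cs with
  | [] => matched
  | c :: rest =>
    let lst := positions.getD c []
    let k := PySem.List.bisectRight lst pos
    if hk : k < lst.length then
      pvBLoop positions rest lst[k] (matched ++ [c])
    else matched

-- positions[ch] = ascending list of indices at which ch occurs in the string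
def pvPositions (s : List Char) : PySem.Dict Char (List Int) :=
  (PySem.List.enumerate s 0).foldl (fun d p => d.modify p.2 [] (· ++ [p.1])) PySem.Dict.empty

def longest_anagram_alt (string : String) (dictionary : List String) : String :=
  let positions := pvPositions string.toList
  String.mk (dictionary.foldl (fun best d =>
    let cand := pvBLoop positions d.toList (-1) []
    if cand.length > best.length then cand else best) [])

-- ===== PRECONDITION & SPEC =====
def Spec_longest_anagram (string : String) (dictionary : List String) (out : String) : Prop := out = longest_anagram_alt string dictionary
instance (string : String) (dictionary : List String) (out : String) : Decidable (Spec_longest_anagram string dictionary out) := by unfold Spec_longest_anagram; infer_instance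

-- ===== CLAIM (what is proved, stated in full; the proofs are below) =====
def Claim_equal_longest_anagram : Prop := ∀ (string : String) (dictionary : List String), Dom_longest_anagram string dictionary → Spec_longest_anagram string dictionary (longest_anagram string dictionary)

-- ===== LEMMAS AND PROOFS =====

-- the common specification: the greedy longest prefix of d matched as a subsequence of s
def pvGreedy : List Char → List Char → List Char
  | _, [] => []
  | [], _ :: _ => []
  | c :: d', x :: s' => if c = x then c :: pvGreedy d' s' else pvGreedy (c :: d') s'

@[simp] theorem pvGreedy_nil_right (d : List Char) : pvGreedy d [] = [] := by
  cases d <;> rfl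

@[simp] theorem pvGreedy_nil_left (s : List Char) : pvGreedy [] s = [] := by
  cases s <;> rfl

theorem pvGreedy_cons_cons (c x : Char) (d s : List Char) :
    pvGreedy (c :: d) (x :: s) = if c = x then c :: pvGreedy d s else pvGreedy (c :: d) s := rfl

-- ascending list of positions (offset n) of c in xs
def pvIdxOf : List Char → Int → Char → List Int
  | [], _, _ => []
  | x :: xs, n, c => if x = c then n :: pvIdxOf xs (n + 1) c else pvIdxOf xs (n + 1) c

theorem pvIdxOf_mem (xs : List Char) (n x : Int) (c : Char) :
    x ∈ pvIdxOf xs n c ↔ ∃ k : Nat, x = n + k ∧ xs[k]? = some c := by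
  induction xs generalizing n with
  | nil => simp [pvIdxOf]
  | cons y ys ih =>
    simp only [pvIdxOf]
    split_ifs with hy
    · subst hy
      constructor
      · intro hm
        rcases List.mem_cons.1 hm with rfl | hm
        · exact ⟨0, by simp⟩
        · obtain ⟨k, hk, hget⟩ := (ih (n + 1)).1 hm
          exact ⟨k + 1, by omega, by simpa using hget⟩
      · rintro ⟨k, hk, hget⟩
        cases k with
        | zero => simp only [Nat.cast_zero, add_zero] at hk; simp [hk]
        | succ k =>
          right
          exact (ih (n + 1)).2 ⟨k, by omega, by simpa using hget⟩
    · constructor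
      · intro hm
        obtain ⟨k, hk, hget⟩ := (ih (n + 1)).1 hm
        exact ⟨k + 1, by omega, by simpa using hget⟩
      · rintro ⟨k, hk, hget⟩
        cases k with
        | zero => simp at hget; exact absurd hget hy
        | succ k =>
          exact (ih (n + 1)).2 ⟨k, by omega, by simpa using hget⟩

theorem pvIdxOf_ge (xs : List Char) (n x : Int) (c : Char) (h : x ∈ pvIdxOf xs n c) : n ≤ x := by
  obtain ⟨k, rfl, -⟩ := (pvIdxOf_mem xs n x c).1 h
  omega

theorem pvIdxOf_sorted (xs : List Char) (n : Int) (c : Char) :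
    (pvIdxOf xs n c).Pairwise (· ≤ ·) := by
  induction xs generalizing n with
  | nil => simp [pvIdxOf]
  | cons y ys ih =>
    simp only [pvIdxOf]
    split_ifs with hy
    · exact List.Pairwise.cons (fun x hx => by have := pvIdxOf_ge ys (n+1) x c hx; omega) (ih (n+1))
    · exact ih (n + 1)

theorem pvEnum_filter (s : List Char) (n : Int) (c : Char) :
    (((PySem.List.enumerate s n).map (fun p => (p.2, p.1))).filter (fun p => p.1 == c)).map (·.2)
      = pvIdxOf s n c := by
  induction s generalizing n with
  | nil => simp [PySem.List.enumerate_nil, pvIdxOf]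
  | cons y ys ih =>
    simp only [PySem.List.enumerate_cons, List.map_cons, List.filter_cons, pvIdxOf]
    by_cases hy : y = c
    · simp [hy, ih]
    · simp [hy, ih]

theorem pvPositions_getD (s : List Char) (c : Char) :
    (pvPositions s).getD c [] = pvIdxOf s 0 c := by
  have hfold :
      pvPositions s
        = ((PySem.List.enumerate s 0).map (fun p => (p.2, p.1))).foldl
            (fun d p => d.modify p.1 [] (· ++ [p.2])) PySem.Dict.empty := by
    rw [List.foldl_map]
    rfl
  rw [hfold, PySem.Dict.getD_foldl_modify_append, pvEnum_filter]
  simp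

-- A's while loop computes pvGreedy on the suffixes
theorem pvWhileA_eq (d s : List Char) (temp : List Char) (i j : Nat) :
    pvWhileA d s temp i j = temp ++ pvGreedy (d.drop i) (s.drop j) := by
  induction temp, i, j using pvWhileA.induct d s with
  | case1 temp i j h heq ih =>
    obtain ⟨hi, hj⟩ := h
    rw [pvWhileA, dif_pos (And.intro hi hj), if_pos heq, ih]
    rw [List.drop_eq_getElem_cons hi, List.drop_eq_getElem_cons hj]
    rw [List.getD_eq_getElem d ' ' hi, List.getD_eq_getElem s ' ' hj] at heq
    rw [pvGreedy_cons_cons, if_pos heq, List.getD_eq_getElem s ' ' hj, heq]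
    simp
  | case2 temp i j h heq ih =>
    obtain ⟨hi, hj⟩ := h
    rw [pvWhileA, dif_pos (And.intro hi hj), if_neg heq, ih]
    rw [List.drop_eq_getElem_cons hi, List.drop_eq_getElem_cons hj]
    rw [List.getD_eq_getElem d ' ' hi, List.getD_eq_getElem s ' ' hj] at heq
    rw [pvGreedy_cons_cons, if_neg heq]
  | case3 temp i j h =>
    rw [pvWhileA, dif_neg h]
    rcases Nat.lt_or_ge i d.length with hi | hi
    · have hj : s.length ≤ j := by omega
      rw [List.drop_eq_nil_of_le hj]
      simp
    · rw [List.drop_eq_nil_of_le hi]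
      simp

theorem pvGreedy_not_mem (c : Char) (cs t : List Char) (h : c ∉ t) :
    pvGreedy (c :: cs) t = [] := by
  induction t with
  | nil => simp
  | cons x xs ih =>
    rw [pvGreedy_cons_cons, if_neg (by simp at h; exact h.1)]
    exact ih (by simp at h; exact h.2)

theorem pvGreedy_found (c : Char) (cs u v : List Char) (h : c ∉ u) :
    pvGreedy (c :: cs) (u ++ c :: v) = c :: pvGreedy cs v := by
  induction u with
  | nil => simp [pvGreedy_cons_cons]
  | cons x xs ih =>
    rw [List.cons_append, pvGreedy_cons_cons, if_neg (by simp at h; exact h.1)]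
    exact ih (by simp at h; exact h.2)

-- when bisect_right walks off the end, c has no occurrence in the remaining suffix
theorem pvBisect_lt (s : List Char) (c : Char) (j : Nat)
    (hk : ¬ PySem.List.bisectRight (pvIdxOf s 0 c) ((j : Int) - 1) < (pvIdxOf s 0 c).length) :
    c ∉ s.drop j := by
  intro hmem
  obtain ⟨q, hq⟩ := List.mem_iff_getElem?.1 hmem
  rw [List.getElem?_drop] at hq
  have hx : ((j + q : Nat) : Int) ∈ pvIdxOf s 0 c :=
    (pvIdxOf_mem s 0 _ c).2 ⟨j + q, by push_cast; ring, hq⟩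
  obtain ⟨idx, hidx, hgx⟩ := List.mem_iff_getElem.1 hx
  obtain ⟨hle, hbelow, -⟩ := PySem.List.bisectRight_spec (pvIdxOf s 0 c) ((j : Int) - 1)
    (pvIdxOf_sorted s 0 c)
  have := hbelow idx hidx (by omega)
  rw [hgx] at this
  omega

-- when it does not, the found element is the FIRST occurrence of c at an index ≥ j
theorem pvBisect_found (s : List Char) (c : Char) (j : Nat)
    (hk : PySem.List.bisectRight (pvIdxOf s 0 c) ((j : Int) - 1) < (pvIdxOf s 0 c).length) :
    ∃ m : Nat, (pvIdxOf s 0 c)[PySem.List.bisectRight (pvIdxOf s 0 c) ((j : Int) - 1)]'hk = (m : Int)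
      ∧ j ≤ m ∧ m < s.length ∧ s[m]? = some c
      ∧ c ∉ (s.drop j).take (m - j) := by
  set lst := pvIdxOf s 0 c with hlst
  set k := PySem.List.bisectRight lst ((j : Int) - 1) with hkdef
  obtain ⟨hle, hbelow, habove⟩ := PySem.List.bisectRight_spec lst ((j : Int) - 1)
    (pvIdxOf_sorted s 0 c)
  have hpmem : lst[k] ∈ lst := List.getElem_mem hk
  obtain ⟨m, hpm, hsm⟩ := (pvIdxOf_mem s 0 lst[k] c).1 hpmem
  rw [zero_add] at hpm
  have hjp : ((j : Int) - 1) < lst[k] := habove k hk le_rfl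
  have hml : m < s.length := (List.getElem?_eq_some_iff.1 hsm).1
  refine ⟨m, hpm, by omega, hml, hsm, ?_⟩
  -- minimality: no occurrence of c in positions [j, m)
  intro hmem
  obtain ⟨q, hqlen, hgq⟩ := List.mem_iff_getElem.1 hmem
  have hql : q < m - j := by
    have := hqlen; simp only [List.length_take, List.length_drop] at this; omega
  have hqd : q < (s.drop j).length := by simp only [List.length_drop]; omega
  have hq : s[j + q]? = some c := by
    rw [← List.getElem?_drop]
    rw [List.getElem?_eq_some_iff]
    refine ⟨hqd, ?_⟩
    rw [← List.getElem_take (h := hqlen)]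
    exact hgq
  have hx : ((j + q : Nat) : Int) ∈ lst :=
    (pvIdxOf_mem s 0 _ c).2 ⟨j + q, by push_cast; ring, hq⟩
  obtain ⟨idx, hidx, hgx⟩ := List.mem_iff_getElem.1 hx
  rcases Nat.lt_or_ge idx k with hik | hik
  · have := hbelow idx hidx hik
    rw [hgx] at this
    omega
  · have hmono : lst[k] ≤ lst[idx] := by
      rcases Nat.eq_or_lt_of_le hik with rfl | hik'
      · exact le_refl _
      · exact (List.pairwise_iff_getElem.1 (pvIdxOf_sorted s 0 c)) k idx hk hidx hik'
    rw [hgx, hpm] at hmono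
    omega

theorem pvDrop_split (c : Char) (s : List Char) (j m : Nat) (hjm : j ≤ m) (hml : m < s.length)
    (hsm : s[m]? = some c) :
    s.drop j = (s.drop j).take (m - j) ++ c :: s.drop (m + 1) := by
  conv_lhs => rw [← List.take_append_drop (m - j) (s.drop j)]
  congr 1
  rw [List.drop_drop]
  have : j + (m - j) = m := by omega
  rw [this, List.drop_eq_getElem_cons hml]
  congr 1
  exact (List.getElem?_eq_some_iff.1 hsm).2

-- B's per-word loop computes pvGreedy on the suffix after pos
theorem pvBLoop_eq (s : List Char) (cs : List Char) (j : Nat) (matched : List Char) :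
    pvBLoop (pvPositions s) cs ((j : Int) - 1) matched = matched ++ pvGreedy cs (s.drop j) := by
  induction cs generalizing j matched with
  | nil => simp [pvBLoop]
  | cons c rest ih =>
    rw [pvBLoop]
    simp only [pvPositions_getD]
    by_cases hk : PySem.List.bisectRight (pvIdxOf s 0 c) ((j : Int) - 1) < (pvIdxOf s 0 c).length
    · rw [dif_pos hk]
      obtain ⟨m, hpm, hjm, hml, hsm, hnot⟩ := pvBisect_found s c j hk
      rw [hpm]
      have hcast : (m : Int) = ((m + 1 : Nat) : Int) - 1 := by push_cast; ring
      rw [hcast, ih (m + 1) (matched ++ [c])]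
      rw [pvDrop_split c s j m hjm hml hsm, pvGreedy_found c rest _ _ hnot]
      simp
    · rw [dif_neg hk]
      rw [pvGreedy_not_mem c rest _ (pvBisect_lt s c j hk)]
      simp

theorem pvCand_eq (s dl : List Char) :
    pvWhileA dl s [] 0 0 = pvBLoop (pvPositions s) dl (-1) [] := by
  have hB := pvBLoop_eq s dl 0 []
  simpa [pvWhileA_eq dl s [] 0 0] using hB.symm

-- ===== VERDICT (by name: the statement is the Claim_ definition above) =====
theorem longest_anagram_spec : Claim_equal_longest_anagram := by
  intro string dictionary _
  unfold Spec_longest_anagram longest_anagram longest_anagram_alt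
  have hstep :
      (fun (best : List Char) (d : String) =>
        let temp := pvWhileA d.toList string.toList [] 0 0
        if temp.length > best.length then temp else best)
      = (fun (best : List Char) (d : String) =>
        let cand := pvBLoop (pvPositions string.toList) d.toList (-1) []
        if cand.length > best.length then cand else best) := by
    funext best d
    simp only [pvCand_eq string.toList d.toList]
  rw [hstep]
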